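-- pv_equiv track=rewrite | github.com/MH-Farhadi/kinova-brace | motion_generation/engine/episode_runner.py | _select_target
-- ===== SOURCE A (Python) =====
-- from typing import Dict, List, Optional, Tuple, Any
--
-- def _select_target(objects: List[Dict[str, Any]], target_label: Optional[str]) -> Optional[Dict[str, Any]]:
--     if len(objects) == 0:
--         return None
--     if target_label is None:
--         return objects[0]
--     # Prefer exact match on label (case-insensitive)
--     for o in objects:
--         if str(o.get("label", "")).lower() == target_label.lower():
--             return o
--     # Fallback: substring match
--     for o in objects:
--         if target_label.lower() in str(o.get("label", "")).lower():
--             return o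
--     return objects[0]
-- ===== SOURCE B (Python) =====
-- def _select_target(objects, target_label):
--     if not objects:
--         return None
--     if target_label is None:
--         return objects[0]
--     t = target_label.lower()
--     candidate = None
--     for o in objects:
--         lbl = str(o.get("label", "")).lower()
--         if lbl == t:
--             return o
--         if candidate is None and t in lbl:
--             candidate = o
--     return candidate if candidate is not None else objects[0]
-- ===== Notes on version B (the rewrite author's own statement) =====
-- stated objective: faster
-- what changed: Single pass with a first-seen substring-fallback candidate and one lowercasing per label, replacing A's two full passes that lowercase target and labels repeatedly.
import Mathlib
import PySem

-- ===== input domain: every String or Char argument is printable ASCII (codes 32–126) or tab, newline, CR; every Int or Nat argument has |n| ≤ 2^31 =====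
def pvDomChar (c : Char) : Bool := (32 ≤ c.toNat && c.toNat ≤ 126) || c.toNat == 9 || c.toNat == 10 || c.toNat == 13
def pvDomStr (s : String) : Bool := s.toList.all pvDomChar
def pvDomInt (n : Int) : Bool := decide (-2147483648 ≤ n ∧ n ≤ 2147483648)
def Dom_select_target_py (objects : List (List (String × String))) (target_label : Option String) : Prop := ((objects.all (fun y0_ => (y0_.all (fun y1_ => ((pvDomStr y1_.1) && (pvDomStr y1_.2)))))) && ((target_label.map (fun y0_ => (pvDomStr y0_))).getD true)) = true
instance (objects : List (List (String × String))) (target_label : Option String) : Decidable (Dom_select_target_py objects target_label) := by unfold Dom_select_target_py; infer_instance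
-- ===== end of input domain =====

-- B replaces A's two full passes by a single pass keeping a first-seen substring-fallback
-- candidate, lowercasing each label once (objective: faster by a constant factor).


-- ===== PORT A =====
-- o.get("label", ""): first match in the association list, else ""
def pvGetLabel (o : List (String × String)) : String :=
  ((o.find? (fun kv => kv.1 == "label")).map (·.2)).getD ""

-- two passes: first exact match on lowered label, then substring match, else objects[0]
def select_target_py (objects : List (List (String × String))) (target_label : Option String) : Option (List (String × String)) :=
  if objects.length = 0 then none
  else
    match target_label with
    | none => objects.head?
    | some t =>
      match objects.find? (fun o =>
          PySem.Str.lower (pvGetLabel o) == PySem.Str.lower t) with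
      | some o => some o
      | none =>
        match objects.find? (fun o =>
            PySem.Str.isIn (PySem.Str.lower t) (PySem.Str.lower (pvGetLabel o))) with
        | some o => some o
        | none => objects.head?

-- ===== PORT B =====
-- single pass: early return on exact match, first-seen substring candidate as fallback
def select_target_py_altLoop (t : String) :
    List (List (String × String)) → Option (List (String × String)) → Option (List (String × String))
  | [], cand => cand
  | o :: rest, cand =>
    let lbl := PySem.Str.lower (pvGetLabel o)
    if lbl == t then some o
    else select_target_py_altLoop t rest
      (if cand.isNone && PySem.Str.isIn t lbl then some o else cand)

def select_target_py_alt (objects : List (List (String × String))) (target_label : Option String) : Option (List (String × String)) :=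
  match objects with
  | [] => none
  | o0 :: _ =>
    match target_label with
    | none => some o0
    | some tl =>
      match select_target_py_altLoop (PySem.Str.lower tl) objects none with
      | some o => some o
      | none => some o0

-- ===== PRECONDITION & SPEC =====
def Spec_select_target_py (objects : List (List (String × String))) (target_label : Option String) (out : Option (List (String × String))) : Prop := out = select_target_py_alt objects target_label
instance (objects : List (List (String × String))) (target_label : Option String) (out : Option (List (String × String))) : Decidable (Spec_select_target_py objects target_label out) := by unfold Spec_select_target_py; infer_instance

-- ===== CLAIM (what is proved, stated in full; the proofs are below) =====
def Claim_equal_select_target_py : Prop := ∀ (objects : List (List (String × String))) (target_label : Option String), Dom_select_target_py objects target_label → Spec_select_target_py objects target_label (select_target_py objects target_label)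

-- ===== LEMMAS AND PROOFS =====

/-- The B loop equals: first exact match, else the incoming candidate, else the first
    substring match. -/
lemma altLoop_eq (t : String) (xs : List (List (String × String)))
    (cand : Option (List (String × String))) :
    select_target_py_altLoop t xs cand =
      match xs.find? (fun o => PySem.Str.lower (pvGetLabel o) == t) with
      | some o => some o
      | none =>
        cand.or (xs.find? (fun o =>
          PySem.Str.isIn t (PySem.Str.lower (pvGetLabel o)))) := by
  induction xs generalizing cand with
  | nil => cases cand <;> simp [select_target_py_altLoop]
  | cons o rest ih =>
    simp only [select_target_py_altLoop, List.find?_cons]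
    by_cases he : PySem.Str.lower (pvGetLabel o) == t
    · simp [he]
    · simp only [he, Bool.false_eq_true, if_false, ih]
      cases cand with
      | some c => simp
      | none =>
        cases hs : PySem.Chars.isIn t.toList (PySem.Chars.lower (pvGetLabel o).toList) <;>
          cases hF : List.find? (fun o => PySem.Str.lower (pvGetLabel o) == t) rest <;>
            simp [hs, hF]

-- ===== VERDICT (by name: the statement is the Claim_ definition above) =====
theorem select_target_py_spec : Claim_equal_select_target_py := by
  intro objects target_label _
  unfold Spec_select_target_py select_target_py select_target_py_alt
  cases objects with
  | nil => simp
  | cons o0 rest =>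
    cases target_label with
    | none => simp
    | some t =>
      simp only [List.length_cons, Nat.succ_ne_zero, if_false, altLoop_eq, Option.none_or]
      cases hE : (o0 :: rest).find? (fun o =>
          PySem.Str.lower (pvGetLabel o) == PySem.Str.lower t) with
      | some o => simp
      | none =>
        cases hS : (o0 :: rest).find? (fun o =>
            PySem.Str.isIn (PySem.Str.lower t) (PySem.Str.lower (pvGetLabel o))) with
        | some o => simp
        | none => simp
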